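-- pv_equiv track=rewrite | github.com/Unispace365/toolbar | Unispace.Tab/NA.panel/Renumber.pulldown/AutoRenumberRooms.pushbutton/script.py | extract_floor_number
-- ===== SOURCE A (Python) =====
-- def extract_floor_number(s):
--     digits = ""
--     for char in s:
--         if char.isdigit():
--             digits += char
--         elif digits:
--             break
--     if digits and digits[0] == '0':
--         return digits
--     if digits and int(digits) < 10:
--         return "0%s" % digits
--     if digits:
--         return digits
--     else:
--         return None
-- ===== SOURCE B (Python) =====
-- def extract_floor_number(s):
--     # Two-phase scan: find the first digit run by index, slice it out,
--     # then format with an early return instead of a branch chain.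
--     n = len(s)
--     i = 0
--     while i < n and not s[i].isdigit():
--         i += 1
--     j = i
--     while j < n and s[j].isdigit():
--         j += 1
--     digits = s[i:j]
--     if not digits:
--         return None
--     if digits[0] != '0' and int(digits) < 10:
--         return '0' + digits
--     return digits
-- ===== Notes on version B (the rewrite author's own statement) =====
-- stated objective: alternative
-- what changed: B locates the first digit run with two index scans and slices it out (s[i:j]) instead of A's character-accumulating loop with a break, and collapses A's four-way return chain into an early None return plus one padding condition.
import Mathlib
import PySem

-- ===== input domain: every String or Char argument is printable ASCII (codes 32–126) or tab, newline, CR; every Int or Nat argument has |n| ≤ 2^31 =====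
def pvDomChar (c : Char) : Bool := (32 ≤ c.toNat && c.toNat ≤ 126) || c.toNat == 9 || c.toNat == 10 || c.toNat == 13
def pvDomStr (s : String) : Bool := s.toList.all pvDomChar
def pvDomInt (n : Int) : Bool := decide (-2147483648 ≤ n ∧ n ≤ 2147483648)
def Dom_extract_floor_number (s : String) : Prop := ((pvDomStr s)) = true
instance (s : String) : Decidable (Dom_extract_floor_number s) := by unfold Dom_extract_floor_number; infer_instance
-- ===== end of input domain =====

-- B finds the first digit run by a two-phase index scan and a slice instead of A's
-- accumulate-with-break loop, and collapses the return chain (idiomatic; same cost).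

-- ===== PORT A =====
-- A's loop: accumulate digits; on a non-digit, break if the accumulator is nonempty.
def pvLoopA : List Char → List Char → List Char
  | [], acc => acc
  | c :: rest, acc =>
    if PySem.Chars.isdigit c then pvLoopA rest (acc ++ [c])
    else if acc ≠ [] then acc
    else pvLoopA rest acc

def extract_floor_number (s : String) : Option String :=
  let digits := pvLoopA s.toList []
  -- int(digits): digits is a nonempty run of ASCII digit chars whenever this is
  -- evaluated on a Dom input, so int() never raises; ofChars? is some there and
  -- .getD 0 is exact.
  if digits ≠ [] ∧ PySem.List.pyGetD digits 0 ' ' = '0' then some (String.ofList digits)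
  else if digits ≠ [] ∧ (PySem.Int.ofChars? digits).getD 0 < 10 then
    some (String.ofList ('0' :: digits))      -- "0%s" % digits
  else if digits ≠ [] then some (String.ofList digits)
  else none

-- ===== PORT B =====
-- first while loop of Source B: advance i past leading non-digits
def pvScanSkip : List Char → Nat → Nat
  | [], i => i
  | c :: rest, i => if PySem.Chars.isdigit c then i else pvScanSkip rest (i + 1)

-- second while loop of Source B: advance j over the digit run
def pvScanTake : List Char → Nat → Nat
  | [], j => j
  | c :: rest, j => if PySem.Chars.isdigit c then pvScanTake rest (j + 1) else j

def extract_floor_number_alt (s : String) : Option String :=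
  let cs := s.toList
  let i := pvScanSkip cs 0
  let j := pvScanTake (cs.drop i) i
  let digits := PySem.List.slice cs (some (i : Int)) (some (j : Int))  -- s[i:j]
  if digits = [] then none
  -- int(digits) never raises here (nonempty ASCII digit run on Dom): see port A.
  else if digits.headD ' ' ≠ '0' ∧ (PySem.Int.ofChars? digits).getD 0 < 10 then
    some (String.ofList ('0' :: digits))
  else some (String.ofList digits)

-- ===== PRECONDITION & SPEC =====
def Spec_extract_floor_number (s : String) (out : Option String) : Prop := out = extract_floor_number_alt s
instance (s : String) (out : Option String) : Decidable (Spec_extract_floor_number s out) := by unfold Spec_extract_floor_number; infer_instance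

-- ===== CLAIM (what is proved, stated in full; the proofs are below) =====
def Claim_equal_extract_floor_number : Prop := ∀ (s : String), Dom_extract_floor_number s → Spec_extract_floor_number s (extract_floor_number s)

-- ===== LEMMAS AND PROOFS =====

lemma pvScanSkip_spec (cs : List Char) (i : Nat) :
    pvScanSkip cs i = i + (cs.takeWhile (fun c => !PySem.Chars.isdigit c)).length := by
  induction cs generalizing i with
  | nil => simp [pvScanSkip]
  | cons c rest ih =>
    by_cases h : PySem.Chars.isdigit c <;> simp [pvScanSkip, h, ih] ; omega

lemma pvScanTake_spec (cs : List Char) (j : Nat) :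
    pvScanTake cs j = j + (cs.takeWhile PySem.Chars.isdigit).length := by
  induction cs generalizing j with
  | nil => simp [pvScanTake]
  | cons c rest ih =>
    by_cases h : PySem.Chars.isdigit c <;> simp [pvScanTake, h, ih] ; omega

lemma pvLoopA_acc (cs : List Char) (acc : List Char) (h : acc ≠ []) :
    pvLoopA cs acc = acc ++ cs.takeWhile PySem.Chars.isdigit := by
  induction cs generalizing acc with
  | nil => simp [pvLoopA]
  | cons c rest ih =>
    by_cases hc : PySem.Chars.isdigit c
    · simp [pvLoopA, hc, ih (acc ++ [c]) (by simp)]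
    · simp [pvLoopA, hc, h]

lemma pvLoopA_nil (cs : List Char) :
    pvLoopA cs [] =
      ((cs.dropWhile (fun c => !PySem.Chars.isdigit c)).takeWhile PySem.Chars.isdigit) := by
  induction cs with
  | nil => simp [pvLoopA]
  | cons c rest ih =>
    by_cases hc : PySem.Chars.isdigit c
    · simp [pvLoopA, hc, pvLoopA_acc rest [c] (by simp)]
    · simp [pvLoopA, hc, ih]

lemma take_length_takeWhile (p : Char → Bool) (l : List Char) :
    l.take (l.takeWhile p).length = l.takeWhile p := by
  nth_rewrite 2 [← List.takeWhile_append_dropWhile (p := p) (l := l)]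
  exact List.take_left

lemma drop_length_takeWhile (p : Char → Bool) (l : List Char) :
    l.drop (l.takeWhile p).length = l.dropWhile p := by
  nth_rewrite 2 [← List.takeWhile_append_dropWhile (p := p) (l := l)]
  exact List.drop_left

lemma digitsB_eq (cs : List Char) :
    PySem.List.slice cs (some ((pvScanSkip cs 0 : Nat) : Int))
        (some ((pvScanTake (cs.drop (pvScanSkip cs 0)) (pvScanSkip cs 0) : Nat) : Int)) =
      ((cs.dropWhile (fun c => !PySem.Chars.isdigit c)).takeWhile PySem.Chars.isdigit) := by
  rw [PySem.List.slice_natCast]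
  rw [pvScanSkip_spec, pvScanTake_spec]
  simp only [Nat.zero_add]
  rw [drop_length_takeWhile]
  have : (cs.takeWhile fun c => !PySem.Chars.isdigit c).length +
      ((cs.dropWhile fun c => !PySem.Chars.isdigit c).takeWhile PySem.Chars.isdigit).length -
      (cs.takeWhile fun c => !PySem.Chars.isdigit c).length =
      ((cs.dropWhile fun c => !PySem.Chars.isdigit c).takeWhile PySem.Chars.isdigit).length := by
    omega
  rw [this, take_length_takeWhile]

-- ===== VERDICT (by name: the statement is the Claim_ definition above) =====
theorem extract_floor_number_spec : Claim_equal_extract_floor_number := by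
  intro s _
  unfold Spec_extract_floor_number extract_floor_number extract_floor_number_alt
  simp only [pvLoopA_nil, digitsB_eq]
  set d := ((s.toList.dropWhile (fun c => !PySem.Chars.isdigit c)).takeWhile PySem.Chars.isdigit) with hd
  match d with
  | [] => simp
  | c :: t =>
    by_cases h0 : c = '0'
    · simp [h0, PySem.List.pyGetD_zero_cons]
    · by_cases hv : (PySem.Int.ofChars? (c :: t)).getD 0 < 10
      · simp [h0, hv, PySem.List.pyGetD_zero_cons]
      · simp [h0, hv, PySem.List.pyGetD_zero_cons]
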